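-- pv_equiv track=rewrite | github.com/sf-ghc-rreddy/DB2ICE-DB2-to-Snowflake-Iceberg-DDL-Converter | db2ice/parser.py | _strip_leading_comments
-- ===== SOURCE A (Python) =====
-- def _strip_leading_comments(stmt: str) -> str:
--     """Remove leading SQL comments from a statement"""
--     lines = stmt.split('\n')
--     result_lines = []
--     found_code = False
--
--     for line in lines:
--         stripped = line.strip()
--         # Skip comment-only lines at the beginning
--         if not found_code and (stripped.startswith('--') or not stripped):
--             continue
--         found_code = True
--         result_lines.append(line)
--
--     return '\n'.join(result_lines)
-- ===== SOURCE B (Python) =====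
-- def _strip_leading_comments(stmt: str) -> str:
--     """Remove leading SQL comments from a statement"""
--     lines = stmt.split('\n')
--     start = len(lines)
--     for i, line in enumerate(lines):
--         s = line.strip()
--         if s and not s.startswith('--'):
--             start = i
--             break
--     return '\n'.join(lines[start:])
-- ===== Notes on version B (the rewrite author's own statement) =====
-- stated objective: simpler
-- what changed: Replaces the flag-guarded accumulation loop by a two-phase decomposition: find the index of the first non-comment, non-blank line, then slice and join the remaining lines.
import Mathlib
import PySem

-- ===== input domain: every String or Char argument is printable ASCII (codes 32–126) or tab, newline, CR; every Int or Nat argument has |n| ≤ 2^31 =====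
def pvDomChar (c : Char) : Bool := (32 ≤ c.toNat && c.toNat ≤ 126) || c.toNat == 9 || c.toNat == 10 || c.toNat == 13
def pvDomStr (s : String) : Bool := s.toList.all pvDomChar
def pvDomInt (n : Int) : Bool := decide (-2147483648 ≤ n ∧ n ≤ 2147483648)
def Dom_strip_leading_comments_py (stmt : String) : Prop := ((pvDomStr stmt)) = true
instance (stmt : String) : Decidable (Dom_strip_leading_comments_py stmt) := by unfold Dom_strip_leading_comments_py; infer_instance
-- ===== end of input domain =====

-- B replaces A's flag-guarded accumulation by a two-phase decomposition (find the first code line's index, then slice and join); objective: simpler.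

-- ===== PORT A =====
-- stmt.split('\n'): PySem.Str.split? is none only for an empty separator; with the literal "\n" it is always some, so .getD [] is exact.
-- A's loop: accumulate lines, skipping leading comment/blank lines until code is found.
def pvALoop : List String → List String → Bool → List String
  | [], result_lines, _ => result_lines
  | line :: rest, result_lines, found_code =>
    let stripped := PySem.Str.strip line
    if found_code = false ∧ (PySem.Str.startswith stripped "--" = true ∨ stripped = "") then
      pvALoop rest result_lines found_code
    else
      pvALoop rest (result_lines ++ [line]) true

def strip_leading_comments_py (stmt : String) : String :=
  PySem.Str.join "\n" (pvALoop ((PySem.Str.split? stmt "\n").getD []) [] false)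

-- ===== PORT B =====
-- B's scan: index of the first non-blank, non-comment line (length of the list if none).
def pvFindStart : List String → Nat
  | [] => 0
  | line :: rest =>
    let s := PySem.Str.strip line
    if s ≠ "" ∧ PySem.Str.startswith s "--" = false then 0
    else 1 + pvFindStart rest

def strip_leading_comments_py_alt (stmt : String) : String :=
  let lines := (PySem.Str.split? stmt "\n").getD []
  PySem.Str.join "\n" (lines.drop (pvFindStart lines))

-- ===== PRECONDITION & SPEC =====
def Spec_strip_leading_comments_py (stmt : String) (out : String) : Prop := out = strip_leading_comments_py_alt stmt
instance (stmt : String) (out : String) : Decidable (Spec_strip_leading_comments_py stmt out) := by unfold Spec_strip_leading_comments_py; infer_instance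

-- ===== CLAIM (what is proved, stated in full; the proofs are below) =====
def Claim_equal_strip_leading_comments_py : Prop := ∀ (stmt : String), Dom_strip_leading_comments_py stmt → Spec_strip_leading_comments_py stmt (strip_leading_comments_py stmt)

-- ===== LEMMAS AND PROOFS =====
theorem pvALoop_true (ls : List String) : ∀ acc, pvALoop ls acc true = acc ++ ls := by
  induction ls with
  | nil => intro acc; simp [pvALoop]
  | cons l rest ih => intro acc; simp [pvALoop, ih]

theorem pvALoop_false (ls : List String) : pvALoop ls [] false = ls.drop (pvFindStart ls) := by
  induction ls with
  | nil => rfl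
  | cons l rest ih =>
    show (if false = false ∧ (PySem.Str.startswith (PySem.Str.strip l) "--" = true ∨ PySem.Str.strip l = "")
          then pvALoop rest [] false else pvALoop rest ([] ++ [l]) true)
        = List.drop (if PySem.Str.strip l ≠ "" ∧ PySem.Str.startswith (PySem.Str.strip l) "--" = false
          then 0 else 1 + pvFindStart rest) (l :: rest)
    by_cases hsw : PySem.Chars.startswith (PySem.Chars.strip l.toList) ['-', '-'] = true
    · simp [hsw, ih, Nat.add_comm 1]
    · by_cases he : PySem.Str.strip l = ""
      · simp [he, ih, Nat.add_comm 1]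
      · simp [he, hsw, pvALoop_true]

-- ===== VERDICT (by name: the statement is the Claim_ definition above) =====
theorem strip_leading_comments_py_spec : Claim_equal_strip_leading_comments_py := by
  intro stmt _
  unfold Spec_strip_leading_comments_py strip_leading_comments_py strip_leading_comments_py_alt
  rw [pvALoop_false]
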